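-- pv_equiv track=rewrite | github.com/adamjgmiller/fireflies-to-obsidian | src/markdown_formatter.py | _parse_action_items_string
-- ===== SOURCE A (Python) =====
-- def _parse_action_items_string(action_items_str):
--     """
--     Parse a formatted action items string into individual action items.
--
--     Expected format:
--     **Person Name**
--     Action item 1 (timestamp)
--     Action item 2 (timestamp)
--
--     **Another Person**
--     Another action item (timestamp)
--     """
--     items = []
--     if not action_items_str.strip():
--         return items
--
--     # Split by person sections (lines starting with **)
--     sections = []
--     current_section = []
--
--     for line in action_items_str.strip().split('\n'):
--         line = line.strip()
--         if line.startswith('**') and line.endswith('**'):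
--             # Start of new person section
--             if current_section:
--                 sections.append(current_section)
--             current_section = [line]
--         elif line and current_section:
--             # Action item for current person
--             current_section.append(line)
--
--     # Don't forget the last section
--     if current_section:
--         sections.append(current_section)
--
--     # Process each person's section
--     for section in sections:
--         if len(section) < 2:
--             continue
--
--         person = section[0]  # **Person Name**
--         action_lines = section[1:]
--
--         for action_line in action_lines:
--             if action_line.strip():
--                 # Combine person and action
--                 items.append(f"{person} {action_line}")
--
--     return items
-- ===== SOURCE B (Python) =====
-- def _parse_action_items_string(action_items_str):
--     """Single streaming pass: track the current person header, emit items directly."""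
--     items = []
--     if not action_items_str.strip():
--         return items
--     current_person = None
--     for line in action_items_str.strip().split('\n'):
--         line = line.strip()
--         if line.startswith('**') and line.endswith('**'):
--             current_person = line
--         elif line and current_person is not None:
--             items.append(f"{current_person} {line}")
--     return items
-- ===== Notes on version B (the rewrite author's own statement) =====
-- stated objective: simpler
-- what changed: Replaces A's two-phase structure (group lines into person sections, then a second nested pass over the sections re-checking lengths and re-stripping) with one streaming pass that keeps only a current_person variable and emits each item immediately.
import Mathlib
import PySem

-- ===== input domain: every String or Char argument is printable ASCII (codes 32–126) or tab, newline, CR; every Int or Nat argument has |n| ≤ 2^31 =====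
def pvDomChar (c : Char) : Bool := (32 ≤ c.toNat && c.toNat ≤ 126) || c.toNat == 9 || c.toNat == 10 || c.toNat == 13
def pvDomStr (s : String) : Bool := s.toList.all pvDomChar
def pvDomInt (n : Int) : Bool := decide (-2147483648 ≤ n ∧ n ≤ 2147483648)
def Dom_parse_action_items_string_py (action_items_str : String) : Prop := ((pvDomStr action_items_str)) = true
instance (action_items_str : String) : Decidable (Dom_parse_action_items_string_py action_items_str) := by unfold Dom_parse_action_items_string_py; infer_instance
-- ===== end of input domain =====

-- B replaces A's two-phase group-then-process structure with one streaming pass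
-- keeping only a current-person variable (objective: simpler).

-- ===== PORT A =====
-- first loop: state = (sections, current_section)
def pvStepA (st : List (List String) × List String) (line : String) :
    List (List String) × List String :=
  let line := PySem.Str.strip line
  if PySem.Str.startswith line "**" && PySem.Str.endswith line "**" then
    (if st.2 ≠ [] then st.1 ++ [st.2] else st.1, [line])
  else if line ≠ "" ∧ st.2 ≠ [] then
    (st.1, st.2 ++ [line])
  else st

-- second loop body: process one person's section
def pvProcSec (items : List String) (section_ : List String) : List String :=
  if section_.length < 2 then items
  else
    match section_ with
    | [] => items
    | person :: action_lines =>
      action_lines.foldl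
        (fun items action_line =>
          if PySem.Str.strip action_line ≠ "" then
            items ++ [person ++ " " ++ action_line]
          else items) items

def parse_action_items_string_py (action_items_str : String) : List String :=
  if PySem.Str.strip action_items_str = "" then []
  else
    let lines := ((PySem.Str.split? (PySem.Str.strip action_items_str) "\n").getD [])
    let st := lines.foldl pvStepA ([], [])
    let sections := if st.2 ≠ [] then st.1 ++ [st.2] else st.1
    sections.foldl pvProcSec []

-- ===== PORT B =====
-- streaming: state = (items, current_person)
def pvStepB (st : List String × Option String) (line : String) :
    List String × Option String :=
  let line := PySem.Str.strip line
  if PySem.Str.startswith line "**" && PySem.Str.endswith line "**" then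
    (st.1, some line)
  else if line ≠ "" then
    match st.2 with
    | some person => (st.1 ++ [person ++ " " ++ line], st.2)
    | none => st
  else st

def parse_action_items_string_py_alt (action_items_str : String) : List String :=
  if PySem.Str.strip action_items_str = "" then []
  else
    (((PySem.Str.split? (PySem.Str.strip action_items_str) "\n").getD []).foldl
      pvStepB ([], none)).1

-- ===== PRECONDITION & SPEC =====
def Spec_parse_action_items_string_py (action_items_str : String) (out : List String) : Prop := out = parse_action_items_string_py_alt action_items_str
instance (action_items_str : String) (out : List String) : Decidable (Spec_parse_action_items_string_py action_items_str out) := by unfold Spec_parse_action_items_string_py; infer_instance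

-- ===== CLAIM (what is proved, stated in full; the proofs are below) =====
def Claim_equal_parse_action_items_string_py : Prop := ∀ (action_items_str : String), Dom_parse_action_items_string_py action_items_str → Spec_parse_action_items_string_py action_items_str (parse_action_items_string_py action_items_str)

-- ===== LEMMAS AND PROOFS =====

-- a section's lines after the header are stripped and non-empty
def pvGood (sec : List String) : Prop :=
  ∀ l ∈ sec.drop 1, PySem.Str.strip l = l ∧ l ≠ ""

-- what one section contributes to the output
def pvEmit (sec : List String) : List String :=
  match sec with
  | [] => []
  | person :: rest => rest.map (fun l => person ++ " " ++ l)

theorem pv_dropWhile_idem {α} (p : α → Bool) (l : List α) :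
    List.dropWhile p (List.dropWhile p l) = List.dropWhile p l := by
  induction l with
  | nil => simp
  | cons a t ih =>
    by_cases h : p a
    · simpa [h] using ih
    · simp [h]

theorem pv_dropWhile_eq_self {α} (p : α → Bool) (l : List α)
    (h : ∀ a, l.head? = some a → p a = false) :
    List.dropWhile p l = l := by
  cases l with
  | nil => rfl
  | cons a t => simp [h a rfl]

theorem pv_head?_dropWhile {α} (p : α → Bool) (l : List α) (c : α)
    (hc : (List.dropWhile p l).head? = some c) : p c = false := by
  induction l with
  | nil => simp at hc
  | cons a t ih =>
    rw [List.dropWhile_cons] at hc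
    by_cases h : p a
    · simp [h] at hc; exact ih hc
    · simp [h] at hc; subst hc; simpa using h

theorem pv_chars_strip_strip (l : List Char) :
    PySem.Chars.strip (PySem.Chars.strip l) = PySem.Chars.strip l := by
  unfold PySem.Chars.strip PySem.Chars.lstrip PySem.Chars.rstrip
  set p := PySem.Chars.isspace
  set a := List.dropWhile p l with ha
  set r := (List.dropWhile p a.reverse).reverse with hr
  have hpre : r <+: a := by
    have hsuf : List.dropWhile p a.reverse <:+ a.reverse := List.dropWhile_suffix p
    rw [hr]
    simpa using List.reverse_prefix.mpr hsuf
  have hheadr : ∀ c, r.head? = some c → p c = false := by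
    intro c hc
    rcases hpre with ⟨t, ht⟩
    cases hr2 : r with
    | nil => rw [hr2] at hc; simp at hc
    | cons x xs =>
      rw [hr2] at hc
      simp at hc
      subst hc
      apply pv_head?_dropWhile p l
      rw [← ha, ← ht, hr2]; rfl
  rw [pv_dropWhile_eq_self p r hheadr, hr, List.reverse_reverse, pv_dropWhile_idem]

theorem pv_strip_strip (s : String) :
    PySem.Str.strip (PySem.Str.strip s) = PySem.Str.strip s := by
  unfold PySem.Str.strip
  rw [show (String.ofList (PySem.Chars.strip s.toList)).toList
        = PySem.Chars.strip s.toList from by simp]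
  rw [pv_chars_strip_strip]

theorem pv_emit_procSec (items : List String) (sec : List String) (h : pvGood sec) :
    pvProcSec items sec = items ++ pvEmit sec := by
  cases sec with
  | nil => simp [pvProcSec, pvEmit]
  | cons person rest =>
    cases rest with
    | nil => simp [pvProcSec, pvEmit]
    | cons b t =>
      show pvProcSec items (person :: b :: t) = _
      unfold pvProcSec
      simp only [List.length_cons, pvEmit]
      rw [if_neg (by omega)]
      have : ∀ (rest' : List String) (acc : List String),
          (∀ l ∈ rest', PySem.Str.strip l = l ∧ l ≠ "") →
          rest'.foldl
            (fun items action_line =>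
              if PySem.Str.strip action_line ≠ "" then
                items ++ [person ++ " " ++ action_line]
              else items) acc = acc ++ rest'.map (fun l => person ++ " " ++ l) := by
        intro rest'
        induction rest' with
        | nil => intro acc _; simp
        | cons x xs ih =>
          intro acc hg
          have hx := hg x (by simp)
          simp only [List.foldl_cons, List.map_cons]
          rw [if_pos (by rw [hx.1]; exact hx.2), ih _ (fun l hl => hg l (by simp [hl]))]
          simp
      exact this (b :: t) items (fun l hl => h l (by simpa [pvGood] using hl))

theorem pv_foldl_procSec_append (secs : List (List String)) (cur : List String)
    (items : List String) (h : pvGood cur) :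
    (secs ++ [cur]).foldl pvProcSec items = secs.foldl pvProcSec items ++ pvEmit cur := by
  rw [List.foldl_append, List.foldl_cons, List.foldl_nil, pv_emit_procSec _ _ h]

-- the invariant relating A's fold state and B's fold state
def pvRel (stA : List (List String) × List String) (stB : List String × Option String) : Prop :=
  stB.2 = stA.2.head? ∧ pvGood stA.2 ∧ (∀ s ∈ stA.1, pvGood s) ∧
  stB.1 = stA.1.foldl pvProcSec [] ++ pvEmit stA.2

theorem pv_secs_close (secs : List (List String)) (cur : List String) (h : pvGood cur) :
    (if cur ≠ [] then secs ++ [cur] else secs).foldl pvProcSec [] =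
      secs.foldl pvProcSec [] ++ pvEmit cur := by
  by_cases hc : cur = []
  · simp [hc, pvEmit]
  · rw [if_pos hc, pv_foldl_procSec_append _ _ _ h]

theorem pv_step (stA : List (List String) × List String) (stB : List String × Option String)
    (line : String) (h : pvRel stA stB) : pvRel (pvStepA stA line) (pvStepB stB line) := by
  obtain ⟨secs, cur⟩ := stA
  obtain ⟨res, curp⟩ := stB
  obtain ⟨h1, h2, h3, h4⟩ := h
  simp only at h1 h2 h3 h4
  unfold pvStepA pvStepB
  simp only
  by_cases hc : (PySem.Str.startswith (PySem.Str.strip line) "**" &&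
      PySem.Str.endswith (PySem.Str.strip line) "**") = true
  · rw [if_pos hc, if_pos hc]
    refine ⟨rfl, by intro l hl; simp at hl, ?_, ?_⟩
    · intro s hs
      by_cases hcur : cur = []
      · simp [hcur] at hs; exact h3 s hs
      · rw [if_pos hcur] at hs
        rcases List.mem_append.mp hs with hs | hs
        · exact h3 s hs
        · simpa [List.mem_singleton.mp hs] using h2
    · simp only
      rw [pv_secs_close _ _ h2, ← h4]
      simp [pvEmit]
  · rw [if_neg hc, if_neg hc]
    by_cases hl : PySem.Str.strip line = ""
    · rw [if_neg (fun hh => hh.1 hl), if_neg (fun hh => hh hl)]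
      exact ⟨h1, h2, h3, h4⟩
    · rw [if_pos hl]
      cases hcur : cur with
      | nil =>
        subst hcur
        rw [if_neg (fun hh => hh.2 rfl), h1]
        exact ⟨rfl, h2, h3, h4⟩
      | cons p t =>
        subst hcur
        rw [if_pos ⟨hl, by simp⟩, h1]
        simp only [List.head?_cons]
        refine ⟨rfl, ?_, h3, ?_⟩
        · intro l hlm
          simp only [List.drop_one, List.cons_append, List.tail_cons] at hlm
          rcases List.mem_append.mp hlm with hm | hm
          · exact h2 l (by simp [hm])
          · rcases List.mem_singleton.mp hm with rfl
            exact ⟨pv_strip_strip line, hl⟩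
        · simp only
          rw [h4]
          simp [pvEmit]

theorem pv_fold (lines : List String) (stA : List (List String) × List String)
    (stB : List String × Option String) (h : pvRel stA stB) :
    pvRel (lines.foldl pvStepA stA) (lines.foldl pvStepB stB) := by
  induction lines generalizing stA stB with
  | nil => exact h
  | cons x xs ih =>
    simp only [List.foldl_cons]
    exact ih (pvStepA stA x) (pvStepB stB x) (pv_step stA stB x h)

-- ===== VERDICT (by name: the statement is the Claim_ definition above) =====
theorem parse_action_items_string_py_spec : Claim_equal_parse_action_items_string_py := by
  intro s _
  unfold Spec_parse_action_items_string_py parse_action_items_string_py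
    parse_action_items_string_py_alt
  by_cases hs : PySem.Str.strip s = ""
  · simp [hs]
  · rw [if_neg hs, if_neg hs]
    have h := pv_fold ((PySem.Str.split? (PySem.Str.strip s) "\n").getD []) ([], [])
      ([], none) ⟨rfl, by intro l hl; simp at hl, by intro t ht; simp at ht, rfl⟩
    obtain ⟨h1, h2, h3, h4⟩ := h
    rw [pv_secs_close _ _ h2, ← h4]
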